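-- pv_equiv track=rewrite | github.com/Duc-P/ENGR-102-Team-7 | no_three_in_a_line.py | can_add_point
-- ===== SOURCE A (Python) =====
-- def can_add_point(points, new_point):
--     """Check if adding new_point would result in three collinear points."""
--     x1, y1 = new_point
--     for i in range(len(points)):
--         for j in range(i + 1, len(points)):
--             x2, y2 = points[i]
--             x3, y3 = points[j]
--             if are_collinear((x1, y1), (x2, y2), (x3, y3)):
--                 return False
--     return True
--
-- def are_collinear(p1, p2, p3):
--     """Check if points p1, p2, p3 are collinear using area of triangle formula."""
--     x1, y1 = p1
--     x2, y2 = p2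
--     x3, y3 = p3
--     return (y2 - y1) * (x3 - x2) == (y3 - y2) * (x2 - x1)
-- ===== SOURCE B (Python) =====
-- def _gcd(a, b):
--     a, b = abs(a), abs(b)
--     while b:
--         a, b = b, a % b
--     return a
--
-- def _canon_dir(dx, dy):
--     """Canonical representative of the line direction (dx, dy) != (0, 0)."""
--     g = _gcd(dx, dy)
--     dx, dy = dx // g, dy // g
--     if dx < 0 or (dx == 0 and dy < 0):
--         dx, dy = -dx, -dy
--     return (dx, dy)
--
-- def can_add_point(points, new_point):
--     """Check if adding new_point would result in three collinear points."""
--     x1, y1 = new_point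
--     seen = set()
--     zero = False
--     for (x, y) in points:
--         dx, dy = x - x1, y - y1
--         if dx == 0 and dy == 0:
--             zero = True
--             continue
--         d = _canon_dir(dx, dy)
--         if d in seen:
--             return False
--         seen.add(d)
--     if zero and len(points) >= 2:
--         return False
--     return True
-- ===== Notes on version B (the rewrite author's own statement) =====
-- stated objective: faster
-- what changed: Replaces the O(n^2) scan over all pairs of existing points by a single pass that hashes the gcd-normalized direction vector from new_point to each point (a repeated direction, or a point equal to new_point alongside any other, means collinearity).
import Mathlib
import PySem

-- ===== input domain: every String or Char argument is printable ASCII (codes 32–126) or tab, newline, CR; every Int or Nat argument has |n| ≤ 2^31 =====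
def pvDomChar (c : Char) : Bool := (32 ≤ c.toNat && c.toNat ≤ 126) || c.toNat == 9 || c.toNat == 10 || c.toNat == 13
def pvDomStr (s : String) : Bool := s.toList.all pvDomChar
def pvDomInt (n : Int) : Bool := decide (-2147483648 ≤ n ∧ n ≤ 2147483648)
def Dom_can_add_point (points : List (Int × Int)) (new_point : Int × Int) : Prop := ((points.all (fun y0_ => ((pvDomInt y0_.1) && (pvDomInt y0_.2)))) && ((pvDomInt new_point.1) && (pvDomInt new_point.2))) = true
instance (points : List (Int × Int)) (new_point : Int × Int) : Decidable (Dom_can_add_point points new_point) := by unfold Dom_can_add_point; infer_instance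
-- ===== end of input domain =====

-- B replaces A's all-pairs collinearity scan by one pass that hashes the
-- gcd-normalized direction vector from new_point to each point.

-- ===== PORT A =====
def are_collinear (p1 p2 p3 : Int × Int) : Bool :=
  (p2.2 - p1.2) * (p3.1 - p2.1) == (p3.2 - p2.2) * (p2.1 - p1.1)

def aInner (points : List (Int × Int)) (np pi_ : Int × Int) : List Int → Bool
  | [] => true
  | j :: js =>
    if are_collinear np pi_ (PySem.List.pyGetD points j (0, 0)) then false
    else aInner points np pi_ js

def aOuter (points : List (Int × Int)) (np : Int × Int) : List Int → Bool
  | [] => true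
  | i :: is_ =>
    if aInner points np (PySem.List.pyGetD points i (0, 0))
        (PySem.List.pyRange (i + 1) (PySem.List.len points) 1) then
      aOuter points np is_
    else false

def can_add_point (points : List (Int × Int)) (new_point : Int × Int) : Bool :=
  aOuter points new_point (PySem.List.pyRange 0 (PySem.List.len points) 1)

-- ===== PORT B =====
-- _gcd(a, b): Euclid on absolute values (a, b = abs(a), abs(b); while b: a, b = b, a % b)
def bGcdLoop : Nat → Nat → Nat
  | a, 0 => a
  | a, Nat.succ b => bGcdLoop (Nat.succ b) (a % Nat.succ b)
termination_by a b => b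
decreasing_by exact Nat.mod_lt _ (Nat.succ_pos _)

def bGcd (a b : Int) : Int := (bGcdLoop a.natAbs b.natAbs : Int)

-- _canon_dir(dx, dy)
def bCanonDir (dx dy : Int) : Int × Int :=
  let g := bGcd dx dy
  let dx' := PySem.Int.floordiv dx g
  let dy' := PySem.Int.floordiv dy g
  if dx' < 0 ∨ (dx' = 0 ∧ dy' < 0) then (-dx', -dy') else (dx', dy')

-- the 'for (x, y) in points' loop, carrying (seen, zero); the tail after the loop is the [] case
def bLoop (x1 y1 n : Int) : List (Int × Int) → PySem.Set (Int × Int) → Bool → Bool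
  | [], _, zero => if zero && decide (2 ≤ n) then false else true
  | (x, y) :: rest, seen, zero =>
    let dx := x - x1
    let dy := y - y1
    if dx = 0 ∧ dy = 0 then bLoop x1 y1 n rest seen true
    else
      let d := bCanonDir dx dy
      if PySem.Set.contains seen d then false
      else bLoop x1 y1 n rest (PySem.Set.add seen d) zero

def can_add_point_alt (points : List (Int × Int)) (new_point : Int × Int) : Bool :=
  bLoop new_point.1 new_point.2 (PySem.List.len points) points PySem.Set.empty false

-- ===== PRECONDITION & SPEC =====
def Spec_can_add_point (points : List (Int × Int)) (new_point : Int × Int) (out : Bool) : Prop := out = can_add_point_alt points new_point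
instance (points : List (Int × Int)) (new_point : Int × Int) (out : Bool) : Decidable (Spec_can_add_point points new_point out) := by unfold Spec_can_add_point; infer_instance

-- ===== CLAIM (what is proved, stated in full; the proofs are below) =====
def Claim_equal_can_add_point : Prop := ∀ (points : List (Int × Int)) (new_point : Int × Int), Dom_can_add_point points new_point → Spec_can_add_point points new_point (can_add_point points new_point)

-- ===== LEMMAS AND PROOFS =====

theorem bGcdLoop_eq (b a : Nat) : bGcdLoop a b = Nat.gcd b a := by
  induction b using Nat.strong_induction_on generalizing a with
  | _ b ih =>
    match b with
    | 0 => simp [bGcdLoop]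
    | Nat.succ c =>
      rw [bGcdLoop, ih _ (Nat.mod_lt _ (Nat.succ_pos _)), Nat.gcd_succ]

theorem bGcd_eq (a b : Int) : bGcd a b = (Int.gcd a b : Int) := by
  rw [bGcd, bGcdLoop_eq, Int.gcd]; exact congrArg _ (Nat.gcd_comm _ _)

-- canon spec
theorem bCanonDir_spec (dx dy : Int) (h : ¬(dx = 0 ∧ dy = 0)) :
    (∃ t : Int, t ≠ 0 ∧ dx = t * (bCanonDir dx dy).1 ∧ dy = t * (bCanonDir dx dy).2) ∧
    Int.gcd (bCanonDir dx dy).1 (bCanonDir dx dy).2 = 1 ∧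
    (0 < (bCanonDir dx dy).1 ∨ ((bCanonDir dx dy).1 = 0 ∧ 0 < (bCanonDir dx dy).2)) := by
  have hne : dx ≠ 0 ∨ dy ≠ 0 := by tauto
  have hg : 0 < Int.gcd dx dy := Int.gcd_pos_iff.mpr hne
  have hgI : (0:Int) < (Int.gcd dx dy : Int) := by exact_mod_cast hg
  have hgd : bGcd dx dy = (Int.gcd dx dy : Int) := bGcd_eq dx dy
  have hdvd1 : ((Int.gcd dx dy : Int)) ∣ dx := Int.gcd_dvd_left dx dy
  have hdvd2 : ((Int.gcd dx dy : Int)) ∣ dy := Int.gcd_dvd_right dx dy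
  have hfx : PySem.Int.floordiv dx (bGcd dx dy) = dx / (Int.gcd dx dy : Int) := by
    rw [hgd]; exact PySem.Int.floordiv_eq_ediv_of_pos hgI
  have hfy : PySem.Int.floordiv dy (bGcd dx dy) = dy / (Int.gcd dx dy : Int) := by
    rw [hgd]; exact PySem.Int.floordiv_eq_ediv_of_pos hgI
  set G : Int := (Int.gcd dx dy : Int) with hG
  have hx : G * (dx / G) = dx := Int.mul_ediv_cancel' hdvd1
  have hy : G * (dy / G) = dy := Int.mul_ediv_cancel' hdvd2
  have hcop : Int.gcd (dx / G) (dy / G) = 1 := Int.gcd_div_gcd_div_gcd hg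
  unfold bCanonDir
  simp only [hfx, hfy, ← hG]
  by_cases hc : dx / G < 0 ∨ (dx / G = 0 ∧ dy / G < 0)
  · simp only [hc, if_pos, if_true]
    refine ⟨⟨-G, by omega, by rw [neg_mul_neg]; exact hx.symm, by rw [neg_mul_neg]; exact hy.symm⟩, ?_, ?_⟩
    · simpa using hcop
    · -- sign after negation
      have hnz : ¬(dx / G = 0 ∧ dy / G = 0) := by
        rintro ⟨h1, h2⟩; rw [h1] at hx; rw [h2] at hy; simp at hx hy; exact h ⟨hx.symm, hy.symm⟩
      omega
  · simp only [hc, if_neg, if_false]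
    push_neg at hc
    refine ⟨⟨G, by omega, hx.symm, hy.symm⟩, hcop, ?_⟩
    have hnz : ¬(dx / G = 0 ∧ dy / G = 0) := by
      rintro ⟨h1, h2⟩; rw [h1] at hx; rw [h2] at hy; simp at hx hy; exact h ⟨hx.symm, hy.symm⟩
    omega

theorem prim_eq (p q : Int × Int)
    (hp1 : Int.gcd p.1 p.2 = 1) (hq1 : Int.gcd q.1 q.2 = 1)
    (hps : 0 < p.1 ∨ (p.1 = 0 ∧ 0 < p.2)) (hqs : 0 < q.1 ∨ (q.1 = 0 ∧ 0 < q.2))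
    (hcross : p.1 * q.2 = p.2 * q.1) : p = q := by
  obtain ⟨a, b⟩ := p; obtain ⟨c, d⟩ := q
  simp only at hp1 hq1 hps hqs hcross ⊢
  have hpc : IsCoprime a b := Int.isCoprime_iff_gcd_eq_one.mpr hp1
  have hqc : IsCoprime c d := Int.isCoprime_iff_gcd_eq_one.mpr hq1
  have h1 : a ∣ c := hpc.dvd_of_dvd_mul_left ⟨d, hcross.symm⟩
  have h2 : c ∣ a := hqc.dvd_of_dvd_mul_left ⟨b, by linarith [hcross]⟩
  have hac : a.natAbs = c.natAbs := Nat.dvd_antisymm (Int.natAbs_dvd_natAbs.mpr h1) (Int.natAbs_dvd_natAbs.mpr h2)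
  have hac' : a = c := by omega
  subst hac'
  rcases hps with hpos | ⟨hz, hbpos⟩
  · have : a * d = a * b := by linarith [hcross]
    have : d = b := by
      have := mul_left_cancel₀ (by omega : a ≠ 0) this
      omega
    simp [this]
  · subst hz
    simp [Int.gcd] at hp1 hq1
    have hb : b = 1 := by omega
    have hd : d = 1 := by omega
    simp [hb, hd]

-- cross form of A's collinearity test
theorem are_collinear_iff_cross (np p q : Int × Int) :
    are_collinear np p q = true ↔ (p.1 - np.1) * (q.2 - np.2) = (p.2 - np.2) * (q.1 - np.1) := by
  simp only [are_collinear, beq_iff_eq]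
  constructor <;> intro h <;> nlinarith [h]

theorem are_collinear_left (np q : Int × Int) : are_collinear np np q = true := by
  simp [are_collinear]

theorem are_collinear_right (np p : Int × Int) : are_collinear np p np = true := by
  simp only [are_collinear, beq_iff_eq]; ring

-- for nonzero offsets, collinear through np ⟺ equal canonical directions
theorem are_collinear_iff_canon (np p q : Int × Int)
    (hp : ¬(p.1 - np.1 = 0 ∧ p.2 - np.2 = 0)) (hq : ¬(q.1 - np.1 = 0 ∧ q.2 - np.2 = 0)) :
    (are_collinear np p q = true ↔ bCanonDir (p.1 - np.1) (p.2 - np.2) = bCanonDir (q.1 - np.1) (q.2 - np.2)) := by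
  obtain ⟨⟨t1, ht1, hp1, hp2⟩, hpg, hpsgn⟩ := bCanonDir_spec _ _ hp
  obtain ⟨⟨t2, ht2, hq1, hq2⟩, hqg, hqsgn⟩ := bCanonDir_spec _ _ hq
  set c1 := bCanonDir (p.1 - np.1) (p.2 - np.2) with hc1
  set c2 := bCanonDir (q.1 - np.1) (q.2 - np.2) with hc2
  rw [are_collinear_iff_cross]
  constructor
  · intro h
    apply prim_eq _ _ hpg hqg hpsgn hqsgn
    have h2 : t1 * t2 * (c1.1 * c2.2) = t1 * t2 * (c1.2 * c2.1) := by
      rw [hp1, hp2, hq1, hq2] at h; linear_combination h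
    exact mul_left_cancel₀ (mul_ne_zero ht1 ht2) h2
  · intro h
    rw [hp1, hp2, hq1, hq2, h]; ring

theorem aInner_eq_all (points : List (Int × Int)) (np pi_ : Int × Int) (js : List Int) :
    aInner points np pi_ js = js.all (fun j => !are_collinear np pi_ (PySem.List.pyGetD points j (0, 0))) := by
  induction js with
  | nil => rfl
  | cons j js ih => rw [aInner]; split <;> simp_all

theorem aOuter_eq_all (points : List (Int × Int)) (np : Int × Int) (is_ : List Int) :
    aOuter points np is_ = is_.all (fun i => aInner points np (PySem.List.pyGetD points i (0, 0))
        (PySem.List.pyRange (i + 1) (PySem.List.len points) 1)) := by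
  induction is_ with
  | nil => rfl
  | cons i is_ ih => rw [aOuter]; split <;> simp_all

theorem can_add_point_iff (points : List (Int × Int)) (np : Int × Int) :
    can_add_point points np = true ↔
      points.Pairwise (fun p q => are_collinear np p q = false) := by
  rw [can_add_point, aOuter_eq_all, List.pairwise_iff_getElem, List.all_eq_true]
  constructor
  · intro h i j hi hj hij
    have h1 := h (i : Int) (PySem.List.mem_pyRange_one.mpr (by simp [PySem.List.len_eq]; omega))
    rw [aInner_eq_all, List.all_eq_true] at h1
    have h2 := h1 (j : Int) (PySem.List.mem_pyRange_one.mpr (by simp [PySem.List.len_eq]; omega))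
    rw [PySem.List.pyGetD_eq_getElem _ _ (by omega) (by exact_mod_cast hi),
        PySem.List.pyGetD_eq_getElem _ _ (by omega) (by exact_mod_cast hj)] at h2
    simpa using h2
  · intro h i hi
    rw [aInner_eq_all, List.all_eq_true]
    intro j hj
    rw [PySem.List.mem_pyRange_one] at hi hj
    rw [PySem.List.len_eq] at hi hj
    have hi' : 0 ≤ i ∧ i < points.length := by omega
    have hj' : 0 ≤ j ∧ j < points.length := by omega
    rw [PySem.List.pyGetD_eq_getElem _ _ hi'.1 (by exact_mod_cast hi'.2),
        PySem.List.pyGetD_eq_getElem _ _ hj'.1 (by exact_mod_cast hj'.2)]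
    have := h i.toNat j.toNat (by omega) (by omega) (by omega)
    simpa using this

def pvIsZ (x1 y1 : Int) (p : Int × Int) : Bool := decide (p.1 - x1 = 0 ∧ p.2 - y1 = 0)
def pvCanon (x1 y1 : Int) (p : Int × Int) : Int × Int := bCanonDir (p.1 - x1) (p.2 - y1)
def pvCanons (x1 y1 : Int) (l : List (Int × Int)) : List (Int × Int) :=
  (l.filter (fun p => !pvIsZ x1 y1 p)).map (pvCanon x1 y1)

theorem pvOfList_append_singleton (l : List (Int × Int)) (x : Int × Int) :
    PySem.Set.ofList (l ++ [x]) = PySem.Set.add (PySem.Set.ofList l) x := by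
  rw [PySem.Set.ofList_eq_foldl, PySem.Set.ofList_eq_foldl, List.foldl_append]
  rfl

theorem bLoop_char (x1 y1 n : Int) (rest prev : List (Int × Int))
    (hnd : (pvCanons x1 y1 prev).Nodup) :
    bLoop x1 y1 n rest (PySem.Set.ofList (pvCanons x1 y1 prev)) (prev.any (pvIsZ x1 y1)) = true ↔
      ((pvCanons x1 y1 (prev ++ rest)).Nodup ∧
       ((prev ++ rest).any (pvIsZ x1 y1) = true → ¬ (2:Int) ≤ n)) := by
  induction rest generalizing prev with
  | nil =>
    simp only [List.append_nil, bLoop]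
    constructor
    · intro h
      refine ⟨hnd, fun hz h2 => ?_⟩
      rw [hz] at h; simp [h2] at h
    · rintro ⟨-, h2⟩
      by_cases hz : prev.any (pvIsZ x1 y1) = true
      · simp [hz, h2 hz]
      · simp only [Bool.not_eq_true] at hz
        simp [hz, hnd]
  | cons p rest ih =>
    obtain ⟨x, y⟩ := p
    rw [bLoop]
    by_cases hz : x - x1 = 0 ∧ y - y1 = 0
    · simp only [hz, if_true, and_self, if_pos]
      have hzB : pvIsZ x1 y1 (x, y) = true := by simp [pvIsZ, hz.1, hz.2]
      have hfil : pvCanons x1 y1 (prev ++ [(x, y)]) = pvCanons x1 y1 prev := by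
        simp [pvCanons, List.filter_append, List.filter_cons, hzB]
      have hany : (prev ++ [(x, y)]).any (pvIsZ x1 y1) = true := by
        simp [hzB]
      have := ih (prev ++ [(x, y)]) (by rw [hfil]; exact hnd)
      rw [hfil, hany] at this
      rw [this]
      simp [List.append_assoc]
    · have hzB : pvIsZ x1 y1 (x, y) = false := by simp [pvIsZ]; tauto
      simp only [hz, if_false, if_neg]
      have hfilc : ∀ tl : List (Int × Int), pvCanons x1 y1 ((x, y) :: tl) =
          bCanonDir (x - x1) (y - y1) :: pvCanons x1 y1 tl := by
        intro tl; simp [pvCanons, List.filter_cons, hzB, pvCanon]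
      by_cases hc : PySem.Set.contains (PySem.Set.ofList (pvCanons x1 y1 prev)) (bCanonDir (x - x1) (y - y1)) = true
      · simp only [hc, if_true, if_pos]
        constructor
        · intro h; exact absurd h (by simp)
        · rintro ⟨hnd2, -⟩
          exfalso
          rw [PySem.Set.contains_iff, PySem.Set.mem_ofList] at hc
          have heq : pvCanons x1 y1 (prev ++ (x, y) :: rest) =
              pvCanons x1 y1 prev ++ bCanonDir (x - x1) (y - y1) :: pvCanons x1 y1 rest := by
            simp [pvCanons, List.filter_append, List.filter_cons, hzB, pvCanon]
          rw [heq, List.nodup_append] at hnd2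
          exact hnd2.2.2 _ hc _ (List.mem_cons_self) rfl
      · simp only [hc, Bool.false_eq_true, if_false]
        have hcm : bCanonDir (x - x1) (y - y1) ∉ pvCanons x1 y1 prev := by
          intro hm; exact hc (by rw [PySem.Set.contains_iff, PySem.Set.mem_ofList]; exact hm)
        have hfil : pvCanons x1 y1 (prev ++ [(x, y)]) = pvCanons x1 y1 prev ++ [bCanonDir (x - x1) (y - y1)] := by
          simp [pvCanons, List.filter_append, List.filter_cons, hzB, pvCanon]
        have hnd' : (pvCanons x1 y1 (prev ++ [(x, y)])).Nodup := by
          rw [hfil, List.nodup_append]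
          exact ⟨hnd, List.nodup_singleton _, by
            intro a ha b hb hab; rw [List.mem_singleton] at hb; subst hb; exact hcm (hab ▸ ha)⟩
        have hadd : PySem.Set.add (PySem.Set.ofList (pvCanons x1 y1 prev)) (bCanonDir (x - x1) (y - y1)) =
            PySem.Set.ofList (pvCanons x1 y1 (prev ++ [(x, y)])) := by
          rw [hfil, pvOfList_append_singleton]
        have hany : (prev ++ [(x, y)]).any (pvIsZ x1 y1) = prev.any (pvIsZ x1 y1) := by
          simp [hzB]
        have := ih (prev ++ [(x, y)]) hnd'
        rw [hany] at this
        rw [hadd, this]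
        simp [List.append_assoc]

theorem pairwise_bridge (x1 y1 : Int) (pts : List (Int × Int)) :
    pts.Pairwise (fun p q => are_collinear (x1, y1) p q = false) ↔
      ((pvCanons x1 y1 pts).Nodup ∧ (pts.any (pvIsZ x1 y1) = true → pts.length < 2)) := by
  constructor
  · intro h
    constructor
    · -- Nodup of canonical directions
      have h1 : (pts.filter (fun p => !pvIsZ x1 y1 p)).Pairwise
          (fun p q => are_collinear (x1, y1) p q = false) := h.filter _
      have h2 : (pts.filter (fun p => !pvIsZ x1 y1 p)).Pairwise
          (fun p q => pvCanon x1 y1 p ≠ pvCanon x1 y1 q) := by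
        refine List.Pairwise.imp_of_mem (fun {p q} hp hq hpq => ?_) h1
        rw [List.mem_filter] at hp hq
        have hnp : ¬(p.1 - x1 = 0 ∧ p.2 - y1 = 0) := by
          have := hp.2; simp [pvIsZ] at this; tauto
        have hnq : ¬(q.1 - x1 = 0 ∧ q.2 - y1 = 0) := by
          have := hq.2; simp [pvIsZ] at this; tauto
        intro hceq
        have := (are_collinear_iff_canon (x1, y1) p q hnp hnq).mpr hceq
        rw [hpq] at this; exact absurd this (by simp)
      exact h2.map _ (fun a b hab => hab)
    · -- a point equal to new_point forces length < 2
      intro hz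
      by_contra hlen
      push_neg at hlen
      rw [List.any_eq_true] at hz
      obtain ⟨z, hzmem, hziz⟩ := hz
      have hznp : z = (x1, y1) := by
        simp [pvIsZ] at hziz
        obtain ⟨z1, z2⟩ := z; simp at hziz ⊢; omega
      obtain ⟨l1, l2, rfl⟩ := List.mem_iff_append.mp hzmem
      rw [List.pairwise_iff_forall_sublist] at h
      match l1, l2 with
      | [], [] => simp at hlen
      | [], b :: l2' =>
        have hs : List.Sublist [z, b] ([] ++ z :: b :: l2') := by
          simp
        have := h hs
        rw [hznp, are_collinear_left] at this
        exact absurd this (by simp)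
      | a :: l1', l2 =>
        have hs : List.Sublist [a, z] ((a :: l1') ++ z :: l2) := by
          show List.Sublist ([a] ++ [z]) _
          refine List.Sublist.append ?_ ?_
          · exact List.singleton_sublist.mpr List.mem_cons_self
          · exact List.singleton_sublist.mpr List.mem_cons_self
        have := h hs
        rw [hznp, are_collinear_right] at this
        exact absurd this (by simp)
  · rintro ⟨hnd, hlen⟩
    rw [List.pairwise_iff_forall_sublist]
    intro a b hs
    have h2 : 2 ≤ pts.length := hs.length_le
    have hzfalse : ∀ c ∈ pts, pvIsZ x1 y1 c = false := by
      intro c hc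
      by_contra hcc
      simp only [Bool.not_eq_false] at hcc
      have := hlen (List.any_eq_true.mpr ⟨c, hc, hcc⟩)
      omega
    have hna := hzfalse a (hs.subset (by simp))
    have hnb := hzfalse b (hs.subset (by simp))
    have hnpa : ¬(a.1 - x1 = 0 ∧ a.2 - y1 = 0) := by simp [pvIsZ] at hna; tauto
    have hnpb : ¬(b.1 - x1 = 0 ∧ b.2 - y1 = 0) := by simp [pvIsZ] at hnb; tauto
    have hfs : List.Sublist ([a, b].filter (fun p => !pvIsZ x1 y1 p)) (pts.filter (fun p => !pvIsZ x1 y1 p)) := hs.filter _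
    rw [show [a, b].filter (fun p => !pvIsZ x1 y1 p) = [a, b] by simp [List.filter_cons, hna, hnb]] at hfs
    have hms : List.Sublist [pvCanon x1 y1 a, pvCanon x1 y1 b] (pvCanons x1 y1 pts) := by
      have := hfs.map (pvCanon x1 y1)
      simpa [pvCanons] using this
    have hne : pvCanon x1 y1 a ≠ pvCanon x1 y1 b := by
      have hpw : (pvCanons x1 y1 pts).Pairwise (· ≠ ·) := hnd
      exact List.pairwise_iff_forall_sublist.mp hpw hms
    rw [← Bool.not_eq_true]
    intro hcoll
    exact hne ((are_collinear_iff_canon (x1, y1) a b hnpa hnpb).mp hcoll)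

theorem can_add_point_alt_iff (points : List (Int × Int)) (np : Int × Int) :
    can_add_point_alt points np = true ↔
      ((pvCanons np.1 np.2 points).Nodup ∧
       (points.any (pvIsZ np.1 np.2) = true → points.length < 2)) := by
  have h0 : (pvCanons np.1 np.2 ([] : List (Int × Int))).Nodup := by simp [pvCanons]
  have := bLoop_char np.1 np.2 (PySem.List.len points) points [] h0
  simp only [pvCanons, List.filter_nil, List.map_nil, List.any_nil, List.nil_append] at this
  rw [can_add_point_alt]
  rw [show (PySem.Set.ofList ([] : List (Int × Int)) : PySem.Set (Int × Int)) = PySem.Set.empty from rfl] at this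
  rw [this, pvCanons, PySem.List.len_eq]
  constructor
  · rintro ⟨h1, h2⟩; exact ⟨h1, fun hz => by have := h2 hz; omega⟩
  · rintro ⟨h1, h2⟩; exact ⟨h1, fun hz => by have := h2 hz; push_cast; omega⟩

theorem can_add_point_AB (points : List (Int × Int)) (new_point : Int × Int) :
    can_add_point points new_point = can_add_point_alt points new_point := by
  rw [Bool.eq_iff_iff, can_add_point_iff, can_add_point_alt_iff,
      show new_point = (new_point.1, new_point.2) from rfl]
  exact pairwise_bridge new_point.1 new_point.2 points

-- ===== VERDICT (by name: the statement is the Claim_ definition above) =====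
theorem can_add_point_spec : Claim_equal_can_add_point := by
  intro points new_point _
  unfold Spec_can_add_point
  exact can_add_point_AB points new_point
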